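-- pv_equiv track=rewrite | github.com/lbliii/patitas | src/patitas/parsing/blocks/list/marker.py | is_list_marker
-- ===== SOURCE A (Python) =====
-- def is_list_marker(text: str) -> bool:
--     """Check if text starts with a list marker pattern.
--
--     Args:
--         text: Text to check (should be stripped of leading whitespace)
--
--     Returns:
--         True if text starts with a valid list marker
--
--     """
--     if not text:
--         return False
--
--     first_char = text[0]
--
--     # Unordered: -, *, + followed by space/tab or end of line
--     if first_char in "-*+":
--         return len(text) == 1 or (len(text) > 1 and text[1] in " \t")
--
--     # Ordered: digits followed by . or ) and space/tab or end of line
--     if first_char.isdigit():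
--         pos = 0
--         while pos < len(text) and text[pos].isdigit():
--             pos += 1
--         if pos > 0 and pos < len(text) and text[pos] in ".)":
--             return pos + 1 == len(text) or (pos + 1 < len(text) and text[pos + 1] in " \t")
--
--     return False
-- ===== SOURCE B (Python) =====
-- def is_list_marker(text: str) -> bool:
--     # Single-pass finite state machine over the characters.
--     # States: 0 = start, 1 = just after a bullet (-*+), 2 = inside a digit run,
--     # 3 = just after the '.' or ')' of an ordered marker.
--     state = 0
--     for ch in text:
--         if state == 0:
--             if ch in "-*+":
--                 state = 1
--             elif ch.isdigit():
--                 state = 2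
--             else:
--                 return False
--         elif state == 1 or state == 3:
--             return ch in " \t"
--         else:  # state == 2
--             if ch.isdigit():
--                 continue
--             elif ch in ".)":
--                 state = 3
--             else:
--                 return False
--     return state == 1 or state == 3
-- ===== Notes on version B (the rewrite author's own statement) =====
-- stated objective: alternative
-- what changed: Replaces A's first-char dispatch with bounds-checked indexing and a manual while-loop digit scan by a single-pass four-state finite automaton driven by one for-loop over the characters.
import Mathlib
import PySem

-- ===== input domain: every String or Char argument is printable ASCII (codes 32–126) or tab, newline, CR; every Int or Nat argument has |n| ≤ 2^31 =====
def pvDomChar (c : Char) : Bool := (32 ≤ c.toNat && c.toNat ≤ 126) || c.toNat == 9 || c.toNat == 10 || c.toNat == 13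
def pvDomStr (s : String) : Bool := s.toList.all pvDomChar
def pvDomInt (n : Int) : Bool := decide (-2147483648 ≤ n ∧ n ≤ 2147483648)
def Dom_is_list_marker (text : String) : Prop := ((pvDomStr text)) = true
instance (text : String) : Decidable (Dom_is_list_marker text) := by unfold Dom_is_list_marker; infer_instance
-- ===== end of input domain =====

-- B replaces A's first-char dispatch, bounds-checked indexing and manual while-loop
-- digit scan by a single-pass four-state finite automaton over the characters
-- (objective: alternative).

-- ===== PORT A =====
-- the while loop 'while pos < len(text) and text[pos].isdigit(): pos += 1'
def aScan (cs : List Char) (pos : Nat) : Nat :=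
  if h : pos < cs.length then
    if PySem.Chars.isdigit cs[pos] then aScan cs (pos + 1) else pos
  else pos
termination_by cs.length - pos

def is_list_marker (text : String) : Bool :=
  let cs := text.toList
  match cs with
  | [] => false                                   -- if not text: return False
  | first :: _ =>
    if first == '-' || first == '*' || first == '+' then
      cs.length == 1 || (decide (1 < cs.length) &&
        (match PySem.List.pyGet? cs 1 with
         | some c => c == ' ' || c == '\t'
         | none => false))
    else if PySem.Chars.isdigit first then
      let pos := aScan cs 0
      if 0 < pos && decide (pos < cs.length) then
        match PySem.List.pyGet? cs (pos : Int) with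
        | some c =>
          if c == '.' || c == ')' then
            (pos + 1 == cs.length) || (decide (pos + 1 < cs.length) &&
              (match PySem.List.pyGet? cs ((pos : Int) + 1) with
               | some d => d == ' ' || d == '\t'
               | none => false))
          else false
        | none => false
      else false
    else false

-- ===== PORT B =====
-- the for-loop 'for ch in text' driving the automaton; states as in Source B:
-- 0 = start, 1 = after bullet, 2 = in digit run, 3 = after '.'/')'.
def bStep : List Char → Nat → Bool
  | [], st => st == 1 || st == 3                       -- 'return state == 1 or state == 3'
  | c :: rest, st =>
    if st == 0 then
      if c == '-' || c == '*' || c == '+' then bStep rest 1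
      else if PySem.Chars.isdigit c then bStep rest 2
      else false
    else if st == 1 || st == 3 then (c == ' ' || c == '\t')   -- 'return ch in " \t"'
    else                                              -- state == 2
      if PySem.Chars.isdigit c then bStep rest 2
      else if c == '.' || c == ')' then bStep rest 3
      else false

def is_list_marker_alt (text : String) : Bool := bStep text.toList 0

-- ===== PRECONDITION & SPEC =====
def Spec_is_list_marker (text : String) (out : Bool) : Prop := out = is_list_marker_alt text
instance (text : String) (out : Bool) : Decidable (Spec_is_list_marker text out) := by unfold Spec_is_list_marker; infer_instance

-- ===== CLAIM (what is proved, stated in full; the proofs are below) =====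
def Claim_equal_is_list_marker : Prop := ∀ (text : String), Dom_is_list_marker text → Spec_is_list_marker text (is_list_marker text)

-- ===== LEMMAS AND PROOFS =====

-- 'the rest of the text is empty or starts with space/tab'
def pvEnds : List Char → Bool
  | [] => true
  | d :: _ => d == ' ' || d == '\t'

theorem bStep_one (t : List Char) : bStep t 1 = pvEnds t := by
  cases t <;> rfl

theorem bStep_three (t : List Char) : bStep t 3 = pvEnds t := by
  cases t <;> rfl

theorem bStep_two (l : List Char) :
    bStep l 2 = (match l.dropWhile PySem.Chars.isdigit with
      | [] => false
      | c :: t => if c == '.' || c == ')' then pvEnds t else false) := by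
  induction l with
  | nil => rfl
  | cons c rest ih =>
    by_cases hd : PySem.Chars.isdigit c = true
    · rw [List.dropWhile_cons_of_pos hd, ← ih]
      simp [bStep, hd]
    · rw [List.dropWhile_cons_of_neg hd]
      by_cases hc : (c == '.' || c == ')') = true
      · simp [bStep, hd, hc, bStep_three]
      · simp [bStep, hd, hc]

theorem drop_takeWhile_length {α : Type} (p : α → Bool) (l : List α) :
    l.drop (l.takeWhile p).length = l.dropWhile p := by
  induction l with
  | nil => rfl
  | cons a l ih =>
    by_cases h : p a = true <;>
      simp [h, ih]

theorem aScan_eq (cs : List Char) (pos : Nat) :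
    aScan cs pos = pos + ((cs.drop pos).takeWhile PySem.Chars.isdigit).length := by
  fun_induction aScan with
  | case1 pos h hd ih =>
      rw [ih, List.drop_eq_getElem_cons h, List.takeWhile_cons_of_pos hd]
      simp; omega
  | case2 pos h hd =>
      rw [List.drop_eq_getElem_cons h, List.takeWhile_cons_of_neg (by simp [hd])]
      simp
  | case3 pos h =>
      rw [List.drop_eq_nil_of_le (by omega)]
      simp

theorem tail_check (cs : List Char) (j : Nat) (hj : j ≤ cs.length) :
    ((cs.length == j) || (decide (j < cs.length) &&
      (match PySem.List.pyGet? cs (j : Int) with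
       | some d => d == ' ' || d == '\t'
       | none => false))) = pvEnds (cs.drop j) := by
  rcases Nat.lt_or_eq_of_le hj with h | h
  · rw [List.drop_eq_getElem_cons h]
    have hg : PySem.List.pyGet? cs (j : Int) = some cs[j] := by
      simp [pysem, h]
    rw [hg]
    simp [pvEnds, Nat.ne_of_gt h, h]
  · rw [h, List.drop_length]
    simp [pvEnds]

-- ===== VERDICT (by name: the statement is the Claim_ definition above) =====
set_option maxHeartbeats 1000000 in
theorem is_list_marker_spec : Claim_equal_is_list_marker := by
  intro text _
  unfold Spec_is_list_marker is_list_marker_alt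
  rcases hcs : text.toList with _ | ⟨first, rest⟩
  · simp [is_list_marker, hcs, bStep]
  · simp only [is_list_marker, hcs]
    by_cases hm : (first == '-' || first == '*' || first == '+') = true
    · rw [if_pos hm]
      simp only [bStep, hm]
      rw [bStep_one]
      have ht := tail_check (first :: rest) 1 (by simp)
      push_cast at ht
      rw [List.drop_succ_cons, List.drop_zero] at ht
      exact ht
    · rw [if_neg hm]
      have hB : bStep (first :: rest) 0 =
          (if first == '-' || first == '*' || first == '+' then bStep rest 1
           else if PySem.Chars.isdigit first then bStep rest 2 else false) := rfl
      rw [hB, if_neg hm]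
      by_cases hd : PySem.Chars.isdigit first = true
      · rw [if_pos hd, if_pos hd, bStep_two, aScan_eq]
        simp only [List.drop_zero, Nat.zero_add]
        set k := ((first :: rest).takeWhile PySem.Chars.isdigit).length with hk
        have hk1 : 1 ≤ k := by
          rw [hk, List.takeWhile_cons_of_pos hd]; simp
        have hdropk : (first :: rest).drop k = (first :: rest).dropWhile PySem.Chars.isdigit := by
          rw [hk]; exact drop_takeWhile_length _ _
        have hdw : rest.dropWhile PySem.Chars.isdigit = (first :: rest).dropWhile PySem.Chars.isdigit := by
          rw [List.dropWhile_cons_of_pos hd]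
        rw [hdw, ← hdropk]
        rcases hsplit : (first :: rest).drop k with _ | ⟨c, t⟩
        · have hlen : (first :: rest).length ≤ k := by
            by_contra hlt
            have := List.drop_eq_getElem_cons (l := first :: rest) (i := k) (by omega)
            rw [hsplit] at this; simp at this
          simp only [List.length_cons] at hlen
          simp
          intro _ h2
          exact absurd h2 (by omega)
        · have hklt : k < (first :: rest).length := by
            by_contra hge
            rw [List.drop_eq_nil_of_le (by omega)] at hsplit
            simp at hsplit
          have hg : PySem.List.pyGet? (first :: rest) (k : Int) = some (first :: rest)[k] := by
            simp [pysem]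
          have hck : (first :: rest)[k] = c := by
            have h2 := List.drop_eq_getElem_cons (l := first :: rest) (i := k) hklt
            rw [hsplit] at h2
            injection h2 with h2a h2b
            exact h2a.symm
          have hdropk1 : (first :: rest).drop (k + 1) = t := by
            have h2 := List.drop_eq_getElem_cons (l := first :: rest) (i := k) hklt
            rw [hsplit] at h2
            injection h2 with h2a h2b
            exact h2b.symm
          have ht := tail_check (first :: rest) (k + 1) (by omega)
          push_cast at ht
          rw [hdropk1] at ht
          have hklt' : k ≤ rest.length := by
            simp only [List.length_cons] at hklt; omega
          rw [if_pos (by simp; omega), hg, hck]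
          by_cases hc : (c == '.' || c == ')') = true
          · simp only [hc, if_true, ← ht, Bool.beq_comm]
          · simp only [hc, if_false, Bool.false_eq_true]
      · rw [if_neg hd, if_neg hd]
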